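-- pv_equiv track=rewrite | github.com/PlayzAhmed/A2SV | 01-Jun-2025/Find the Substring With Maximum Cost 361863.py | maximumCostSubstring
-- ===== SOURCE A (Python) =====
-- def maximumCostSubstring(s, chars, vals):
--     mp = {chr(i+97):i+1 for i in range(26)}
--
--     for i in range(len(chars)):
--         mp[chars[i]] = vals[i]
--
--     ans = 0
--     maxEnding = 0
--     for ch in s:
--         maxEnding = max(maxEnding + mp[ch], mp[ch])
--         ans = max(ans, maxEnding)
--
--     return ans
-- ===== SOURCE B (Python) =====
-- def maximumCostSubstring(s, chars, vals):
--     pairs = list(zip(chars, vals))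
--
--     def value(ch):
--         # last assignment wins, like the dict overwrite in the original
--         for c, v in reversed(pairs):
--             if c == ch:
--                 return v
--         return ord(ch) - 96
--
--     pref = 0
--     minPref = 0
--     ans = 0
--     for ch in s:
--         pref += value(ch)
--         if pref - minPref > ans:
--             ans = pref - minPref
--         if pref < minPref:
--             minPref = pref
--     return ans
-- ===== Notes on version B (the rewrite author's own statement) =====
-- stated objective: alternative
-- what changed: Drops the precomputed dict entirely (value of a char is found by a reverse scan of the zipped chars/vals pairs, falling back to its alphabet position) and replaces Kadane's running best-suffix recurrence with a prefix-sum / minimum-prefix scan.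
import Mathlib
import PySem

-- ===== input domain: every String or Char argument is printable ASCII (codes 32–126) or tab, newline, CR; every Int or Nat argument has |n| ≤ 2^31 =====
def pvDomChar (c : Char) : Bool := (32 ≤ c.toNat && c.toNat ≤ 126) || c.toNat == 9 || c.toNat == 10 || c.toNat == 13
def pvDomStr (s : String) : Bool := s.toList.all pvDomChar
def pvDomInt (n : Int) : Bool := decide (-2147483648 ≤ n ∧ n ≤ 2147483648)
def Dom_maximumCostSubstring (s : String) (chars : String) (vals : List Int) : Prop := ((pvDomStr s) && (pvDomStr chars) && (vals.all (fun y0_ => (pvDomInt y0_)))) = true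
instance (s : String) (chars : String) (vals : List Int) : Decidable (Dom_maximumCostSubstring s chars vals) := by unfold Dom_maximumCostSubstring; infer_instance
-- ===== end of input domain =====

-- B drops A's precomputed dict (a char's value is a reverse scan of the zipped chars/vals pairs,
-- falling back to the alphabet position) and replaces Kadane's recurrence by a prefix-sum /
-- minimum-prefix scan; an alternative of the same spirit, not claimed faster.

-- ===== PORT A =====
-- mp = {chr(i+97): i+1 for i in range(26)}
def pvMp0 : PySem.Dict Char Int :=
  (PySem.List.pyRange 0 26 1).foldl
    (fun d i => d.insert (Char.ofNat (i + 97).toNat) (i + 1)) PySem.Dict.empty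

-- for i in range(len(chars)): mp[chars[i]] = vals[i]
-- (the .getD defaults stand for the IndexError case, which Pre_ excludes)
def pvMpA (chars : String) (vals : List Int) : PySem.Dict Char Int :=
  (PySem.List.pyRange 0 (chars.toList.length : Int) 1).foldl
    (fun d i => d.insert ((PySem.Str.pyGet? chars i).getD ' ') ((PySem.List.pyGet? vals i).getD 0)) pvMp0

def maximumCostSubstring (s : String) (chars : String) (vals : List Int) : Int :=
  let mp := pvMpA chars vals
  -- maxEnding = max(maxEnding + mp[ch], mp[ch]); ans = max(ans, maxEnding)
  -- (mp[ch] ported as .getD 0; the KeyError case is excluded by Pre_)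
  (s.toList.foldl (fun (st : Int × Int) ch =>
      let v := (mp.get? ch).getD 0
      let me := max (st.2 + v) v
      (max st.1 me, me)) (0, 0)).1

-- ===== PORT B =====
-- def value(ch): for c, v in reversed(pairs): if c == ch: return v; return ord(ch) - 96
def pvValB (pairs : List (Char × Int)) (ch : Char) : Int :=
  match pairs.reverse.find? (fun p => p.1 == ch) with
  | some p => p.2
  | none => (ch.toNat : Int) - 96

def maximumCostSubstring_alt (s : String) (chars : String) (vals : List Int) : Int :=
  let pairs := chars.toList.zip vals
  -- state (pref, minPref, ans); pref += value(ch);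
  -- if pref - minPref > ans: ans = pref - minPref; if pref < minPref: minPref = pref
  (s.toList.foldl (fun (st : Int × Int × Int) ch =>
      let p := st.1 + pvValB pairs ch
      (p, if p < st.2.1 then p else st.2.1,
          if p - st.2.1 > st.2.2 then p - st.2.1 else st.2.2)) (0, 0, 0)).2.2

-- ===== PRECONDITION & SPEC =====
-- Pre_ excludes exactly the inputs where Python A raises: vals shorter than chars (IndexError on vals[i])
-- or a character of s neither a lowercase letter nor in chars (KeyError on mp[ch]).
def Pre_maximumCostSubstring (s : String) (chars : String) (vals : List Int) : Prop :=
  (decide (chars.toList.length ≤ vals.length) &&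
   s.toList.all (fun ch => (97 ≤ ch.toNat && ch.toNat ≤ 122) || chars.toList.contains ch)) = true
instance (s : String) (chars : String) (vals : List Int) : Decidable (Pre_maximumCostSubstring s chars vals) := by unfold Pre_maximumCostSubstring; infer_instance

def pvWitness_maximumCostSubstring : String × String × List Int := ("", "", [])

def Spec_maximumCostSubstring (s : String) (chars : String) (vals : List Int) (out : Int) : Prop := out = maximumCostSubstring_alt s chars vals
instance (s : String) (chars : String) (vals : List Int) (out : Int) : Decidable (Spec_maximumCostSubstring s chars vals out) := by unfold Spec_maximumCostSubstring; infer_instance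

-- ===== CLAIM (what is proved, stated in full; the proofs are below) =====
def Claim_equal_maximumCostSubstring : Prop := ∀ (s : String) (chars : String) (vals : List Int), Dom_maximumCostSubstring s chars vals → Pre_maximumCostSubstring s chars vals → Spec_maximumCostSubstring s chars vals (maximumCostSubstring s chars vals)

-- ===== LEMMAS AND PROOFS =====

-- lookup after a left fold of inserts: the LAST insert of the key wins, i.e. the first match in the reversed list
theorem pvFoldInsertGet (ch : Char) :
    ∀ (l : List (Char × Int)) (d : PySem.Dict Char Int),
    (l.foldl (fun d p => d.insert p.1 p.2) d).get? ch
    = (match l.reverse.find? (fun p => p.1 == ch) with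
       | some p => some p.2
       | none => d.get? ch) := by
  intro l
  induction l with
  | nil => intro d; rfl
  | cons p t ih =>
    intro d
    simp only [List.foldl_cons, List.reverse_cons, List.find?_append]
    rw [ih]
    cases h : t.reverse.find? (fun q => q.1 == ch) with
    | some q => simp
    | none =>
      by_cases hpc : p.1 = ch
      · subst hpc; simp [PySem.Dict.get?_insert_self]
      · simp [hpc, PySem.Dict.get?_insert_of_ne _ _ (Ne.symm hpc)]

-- indexed overwrite loop = fold over the zipped pairs, provided vals is long enough
theorem pvZipFold (cl : List Char) :
    ∀ (vs : List Int) (d : PySem.Dict Char Int), cl.length ≤ vs.length →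
    (List.range cl.length).foldl
      (fun d k => d.insert (cl[k]?.getD ' ') (vs[k]?.getD 0)) d
    = (cl.zip vs).foldl (fun d p => d.insert p.1 p.2) d := by
  induction cl with
  | nil => intro vs d _; rfl
  | cons c ct ih =>
    intro vs d h
    cases vs with
    | nil => simp at h
    | cons v vt =>
      simp only [List.length_cons]
      rw [List.range_succ_eq_map]
      simp only [List.foldl_cons, List.foldl_map, List.getElem?_cons_zero, Option.getD_some,
        List.getElem?_cons_succ, List.zip_cons_cons]
      exact ih vt (d.insert c v) (by simpa using h)

-- the a..z base dict maps a lowercase letter to its alphabet position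
theorem pvMp0_get (ch : Char) (hn1 : 97 ≤ ch.toNat) (hn2 : ch.toNat ≤ 122) :
    pvMp0.get? ch = some ((ch.toNat : Int) - 96) := by
  rw [← Char.ofNat_toNat ch]
  generalize ch.toNat = n at hn1 hn2 ⊢
  interval_cases n <;> decide

-- the dict lookup of A equals B's reverse-scan value function, under Pre_'s conditions
theorem pvVal_eq (chars : String) (vals : List Int)
    (hlen : chars.toList.length ≤ vals.length) (ch : Char)
    (hch : (97 ≤ ch.toNat ∧ ch.toNat ≤ 122) ∨ ch ∈ chars.toList) :
    ((pvMpA chars vals).get? ch).getD 0 = pvValB (chars.toList.zip vals) ch := by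
  unfold pvMpA pvValB
  rw [PySem.List.pyRange_zero_natCast, List.foldl_map]
  simp only [PySem.Str.pyGet?_natCast, PySem.List.pyGet?_natCast]
  rw [pvZipFold chars.toList vals pvMp0 hlen, pvFoldInsertGet]
  cases h : (chars.toList.zip vals).reverse.find? (fun p => p.1 == ch) with
  | some q => rfl
  | none =>
    have hlc : 97 ≤ ch.toNat ∧ ch.toNat ≤ 122 := by
      rcases hch with hlc | hmem
      · exact hlc
      · exfalso
        have : ch ∈ (chars.toList.zip vals).map Prod.fst := by
          rw [List.map_fst_zip hlen]; exact hmem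
        rcases List.mem_map.mp this with ⟨q, hq, hq1⟩
        have := List.find?_eq_none.mp h q (List.mem_reverse.mpr hq)
        simp [hq1] at this
    rw [pvMp0_get ch hlc.1 hlc.2]
    rfl

-- loop equivalence: Kadane's (ans, maxEnding) vs prefix-sum (pref, minPref, ans),
-- under the invariant pref - minPref = max maxEnding 0, with value functions agreeing on s
theorem pvLoop_eq (f g : Char → Int) (l : List Char) (hfg : ∀ ch ∈ l, f ch = g ch) :
    ∀ (ans me p mn : Int), p - mn = max me 0 →
    (l.foldl (fun (st : Int × Int) ch =>
        let v := f ch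
        let m := max (st.2 + v) v
        (max st.1 m, m)) (ans, me)).1
    = (l.foldl (fun (st : Int × Int × Int) ch =>
        let p' := st.1 + g ch
        (p', if p' < st.2.1 then p' else st.2.1,
             if p' - st.2.1 > st.2.2 then p' - st.2.1 else st.2.2)) (p, mn, ans)).2.2 := by
  induction l with
  | nil => intro ans me p mn _; rfl
  | cons c t ih =>
    intro ans me p mn h
    have hv : f c = g c := hfg c (by simp)
    simp only [List.foldl_cons, ← hv]
    have hans : (if p + f c - mn > ans then p + f c - mn else ans)
        = max ans (max (me + f c) (f c)) := by split_ifs <;> omega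
    have hmn : p + f c - (if p + f c < mn then p + f c else mn)
        = max (max (me + f c) (f c)) 0 := by split_ifs <;> omega
    rw [hans]
    exact ih (fun ch hm => hfg ch (by simp [hm])) _ _ _ _ hmn

-- ===== VERDICT (by name: the statement is the Claim_ definition above) =====
theorem maximumCostSubstring_spec : Claim_equal_maximumCostSubstring := by
  intro s chars vals _ hpre
  unfold Pre_maximumCostSubstring at hpre
  simp only [Bool.and_eq_true, decide_eq_true_eq, List.all_eq_true, Bool.or_eq_true,
    List.contains_eq_mem] at hpre
  unfold Spec_maximumCostSubstring maximumCostSubstring maximumCostSubstring_alt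
  exact pvLoop_eq _ _ s.toList
    (fun ch hm => pvVal_eq chars vals hpre.1 ch (by
      rcases hpre.2 ch hm with h | h
      · exact Or.inl ⟨h.1, h.2⟩
      · exact Or.inr (by simpa using h))) 0 0 0 0 (by decide)
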